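-- pv_equiv track=rewrite | github.com/Prashant-Aswal/Numbers_and_Bases | Chk14.py | chk14
-- ===== SOURCE A (Python) =====
-- def chk14(num):
--     num = str(num)
--     guide = ['0', '1', '2', '3', '4', '5', '6', '7', '8', '9', 'A', 'a', 'B', 'b', 'C', 'c', 'D', 'd']
--     for i in num:
--         if i in guide:
--             continue
--         else:
--             return False
--     return True
-- ===== SOURCE B (Python) =====
-- import re
--
-- def chk14(num):
--     num = str(num)
--     return re.fullmatch(r'[0-9A-Da-d]*', num) is not None
-- ===== Notes on version B (the rewrite author's own statement) =====
-- stated objective: idiomatic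
-- what changed: Replaced A's explicit per-character loop with early return and a guide list of allowed digit characters by a single regular-expression full match against the character class [0-9A-Da-d]*.
import Mathlib
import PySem

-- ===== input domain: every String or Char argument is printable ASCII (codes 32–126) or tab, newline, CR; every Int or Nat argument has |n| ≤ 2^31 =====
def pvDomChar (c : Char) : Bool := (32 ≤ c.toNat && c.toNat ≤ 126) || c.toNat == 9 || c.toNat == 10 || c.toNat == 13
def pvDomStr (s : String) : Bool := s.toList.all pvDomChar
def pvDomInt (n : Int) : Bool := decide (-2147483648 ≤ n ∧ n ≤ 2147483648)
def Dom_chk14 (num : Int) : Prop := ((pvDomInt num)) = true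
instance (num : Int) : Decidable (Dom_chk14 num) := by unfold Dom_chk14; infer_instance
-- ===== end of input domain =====

-- B replaces A's manual per-character loop with early return by a single regex
-- full-match on the character class [0-9A-Da-d]* (more idiomatic; same cost).

-- ===== PORT A =====
-- the 'guide' list of A, literally
def chk14Guide : List Char :=
  ['0', '1', '2', '3', '4', '5', '6', '7', '8', '9', 'A', 'a', 'B', 'b', 'C', 'c', 'D', 'd']

-- A's for-loop with early 'return False'
def chk14Loop : List Char → Bool
  | [] => true
  | i :: rest => if chk14Guide.contains i then chk14Loop rest else false

def chk14 (num : Int) : Bool :=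
  chk14Loop (PySem.Int.toChars num)      -- num = str(num); for i in num: …

-- ===== PORT B =====
-- membership in the regex character class [0-9A-Da-d] (three code-point ranges)
def chk14Class (c : Char) : Bool :=
  ('0' ≤ c && c ≤ '9') || ('A' ≤ c && c ≤ 'D') || ('a' ≤ c && c ≤ 'd')

-- re.fullmatch(r'[0-9A-Da-d]*', num) is not None: the whole string matches the
-- starred class, i.e. every character lies in the class (empty string matches).
def chk14_alt (num : Int) : Bool :=
  (PySem.Int.toChars num).all chk14Class

-- ===== PRECONDITION & SPEC =====
def Spec_chk14 (num : Int) (out : Bool) : Prop := out = chk14_alt num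
instance (num : Int) (out : Bool) : Decidable (Spec_chk14 num out) := by unfold Spec_chk14; infer_instance

-- ===== CLAIM (what is proved, stated in full; the proofs are below) =====
def Claim_equal_chk14 : Prop := ∀ (num : Int), Dom_chk14 num → Spec_chk14 num (chk14 num)

-- ===== LEMMAS AND PROOFS =====

-- membership in A's guide list coincides with B's character class
theorem contains_guide_eq_class (c : Char) : chk14Guide.contains c = chk14Class c := by
  rw [Bool.eq_iff_iff]
  simp only [chk14Guide, chk14Class, List.contains_cons, List.contains_nil, Bool.or_false,
    Bool.or_eq_true, Bool.and_eq_true, beq_iff_eq, decide_eq_true_eq, Char.ext_iff, Char.le_def,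
    UInt32.le_iff_toNat_le, UInt32.ext_iff]
  simp only [show ('0':Char).val.toNat = 48 from rfl, show ('1':Char).val.toNat = 49 from rfl, show ('2':Char).val.toNat = 50 from rfl, show ('3':Char).val.toNat = 51 from rfl, show ('4':Char).val.toNat = 52 from rfl, show ('5':Char).val.toNat = 53 from rfl, show ('6':Char).val.toNat = 54 from rfl, show ('7':Char).val.toNat = 55 from rfl, show ('8':Char).val.toNat = 56 from rfl, show ('9':Char).val.toNat = 57 from rfl, show ('A':Char).val.toNat = 65 from rfl, show ('a':Char).val.toNat = 97 from rfl, show ('B':Char).val.toNat = 66 from rfl, show ('b':Char).val.toNat = 98 from rfl, show ('C':Char).val.toNat = 67 from rfl, show ('c':Char).val.toNat = 99 from rfl, show ('D':Char).val.toNat = 68 from rfl, show ('d':Char).val.toNat = 100 from rfl]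
  omega

-- A's early-return loop is List.all of the class
theorem chk14Loop_eq_all (cs : List Char) : chk14Loop cs = cs.all chk14Class := by
  induction cs with
  | nil => rfl
  | cons c rest ih =>
    simp only [chk14Loop, List.all_cons, contains_guide_eq_class]
    by_cases h : chk14Class c = true <;> simp [h, ih]

-- ===== VERDICT (by name: the statement is the Claim_ definition above) =====
theorem chk14_spec : Claim_equal_chk14 := by
  intro num _
  unfold Spec_chk14 chk14 chk14_alt
  exact chk14Loop_eq_all _
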